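-- pv_equiv track=rewrite | github.com/ZetangForward/Long-Context-Alignment | logo_exp_code/datasetprcess/backup_code/step2_anatator_filter_data.py | allocate_ids
-- ===== SOURCE A (Python) =====
-- def allocate_ids(remain_process_data, total_processes):
--     avg_length = len(remain_process_data) // total_processes
--     remainder = len(remain_process_data) % total_processes
--     allocated_ids = []
--     start_index = 0
--
--     for i in range(total_processes):
--         end_index = start_index + avg_length + (1 if i < remainder else 0)
--         allocated_ids.append(remain_process_data[start_index:end_index])
--         start_index = end_index
--
--     return allocated_ids
-- ===== SOURCE B (Python) =====
-- def allocate_ids(remain_process_data, total_processes):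
--     # Greedy self-similar splitting: count down the chunks still to make, each time
--     # recomputing divmod on what is left and pulling that chunk off a consuming iterator.
--     allocated_ids = []
--     it = iter(remain_process_data)
--     left = len(remain_process_data)
--     for still in range(total_processes, 0, -1):
--         q, r = divmod(left, still)
--         size = q + (1 if r else 0)
--         allocated_ids.append([next(it) for _ in range(size)])
--         left -= size
--     return allocated_ids
-- ===== Notes on version B (the rewrite author's own statement) =====
-- stated objective: alternative
-- what changed: B replaces A's precomputed avg/remainder and running start_index with greedy self-similar splitting: it counts down the number of chunks still to make and each iteration recomputes divmod on the as-yet-unassigned suffix, pulls that chunk off a consuming iterator.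
import Mathlib
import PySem

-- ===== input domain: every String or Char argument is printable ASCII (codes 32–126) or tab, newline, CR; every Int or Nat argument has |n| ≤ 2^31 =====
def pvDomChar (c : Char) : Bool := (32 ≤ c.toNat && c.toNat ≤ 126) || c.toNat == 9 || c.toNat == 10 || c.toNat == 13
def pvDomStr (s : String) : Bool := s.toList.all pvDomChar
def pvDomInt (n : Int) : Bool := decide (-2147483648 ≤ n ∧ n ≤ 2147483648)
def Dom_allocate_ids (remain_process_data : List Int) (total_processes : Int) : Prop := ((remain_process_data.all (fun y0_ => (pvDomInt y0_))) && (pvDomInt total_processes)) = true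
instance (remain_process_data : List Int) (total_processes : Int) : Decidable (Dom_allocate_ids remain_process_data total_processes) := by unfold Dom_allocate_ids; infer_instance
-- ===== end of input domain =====

-- B drops A's precomputed avg/remainder and running start_index: it counts down the chunks
-- still to make, recomputing divmod on the unassigned suffix and cutting off its head chunk
-- (objective: alternative, a different greedy self-similar decomposition; not faster).

-- ===== PORT A =====
def allocate_ids (remain_process_data : List Int) (total_processes : Int) : List (List Int) :=
  let avg_length := PySem.Int.floordiv (remain_process_data.length : Int) total_processes
  let remainder := PySem.Int.mod (remain_process_data.length : Int) total_processes
  ((PySem.List.pyRange 0 total_processes 1).foldl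
    (fun (st : List (List Int) × Int) i =>
      let end_index := st.2 + avg_length + (if i < remainder then 1 else 0)
      (st.1 ++ [PySem.List.slice remain_process_data (some st.2) (some end_index)], end_index))
    ([], 0)).1

-- ===== PORT B =====
-- The iterator `it` is modelled by the not-yet-consumed suffix; `[next(it) for _ in range(size)]`
-- is `take size.toNat` of it (exact here: the loop invariant left = len(suffix) keeps size within
-- the suffix, so `next` never raises; negative size, like range(size), yields []).
def allocate_ids_alt (remain_process_data : List Int) (total_processes : Int) : List (List Int) :=
  ((PySem.List.pyRange total_processes 0 (-1)).foldl
    (fun (st : List (List Int) × List Int × Int) still =>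
      let q := PySem.Int.floordiv st.2.2 still
      let r := PySem.Int.mod st.2.2 still
      let size := q + (if r ≠ 0 then (1 : Int) else 0)
      (st.1 ++ [st.2.1.take size.toNat], st.2.1.drop size.toNat, st.2.2 - size))
    ([], remain_process_data, (remain_process_data.length : Int))).1

-- ===== PRECONDITION & SPEC =====
-- Pre_ excludes total_processes = 0, on which Python A raises ZeroDivisionError.
def Pre_allocate_ids (remain_process_data : List Int) (total_processes : Int) : Prop :=
  total_processes ≠ 0
instance (remain_process_data : List Int) (total_processes : Int) : Decidable (Pre_allocate_ids remain_process_data total_processes) := by unfold Pre_allocate_ids; infer_instance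

def pvWitness_allocate_ids : List Int × Int := ([1, 2, 3, 4, 5], 2)

def Spec_allocate_ids (remain_process_data : List Int) (total_processes : Int) (out : List (List Int)) : Prop := out = allocate_ids_alt remain_process_data total_processes
instance (remain_process_data : List Int) (total_processes : Int) (out : List (List Int)) : Decidable (Spec_allocate_ids remain_process_data total_processes out) := by unfold Spec_allocate_ids; infer_instance

-- ===== CLAIM (what is proved, stated in full; the proofs are below) =====
def Claim_equal_allocate_ids : Prop := ∀ (remain_process_data : List Int) (total_processes : Int), Dom_allocate_ids remain_process_data total_processes → Pre_allocate_ids remain_process_data total_processes → Spec_allocate_ids remain_process_data total_processes (allocate_ids remain_process_data total_processes)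

-- ===== LEMMAS AND PROOFS =====

-- The common closed form both ports are reduced to: the i-th balanced chunk (Nat arithmetic).
def chunkN (ys : List Int) (q r i : Nat) : List Int :=
  ((ys.drop (i * q + min i r)).take (q + if i < r then 1 else 0))

-- A's loop invariant: after j steps the accumulator holds the first j chunks and
-- start_index = j*q + min j r.
lemma A_inv (xs : List Int) (q r : Nat) (j : Nat) :
    ((PySem.List.pyRange 0 (j : Int) 1).foldl
      (fun (st : List (List Int) × Int) i =>
        let e := st.2 + (q : Int) + (if i < (r : Int) then 1 else 0)
        (st.1 ++ [PySem.List.slice xs (some st.2) (some e)], e))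
      ([], 0))
    = ((List.range j).map (chunkN xs q r), ((j * q + min j r : Nat) : Int)) := by
  induction j with
  | zero =>
    rw [PySem.List.pyRange_one_eq_nil (by omega)]
    simp
  | succ j ih =>
    have hcast : ((j + 1 : Nat) : Int) = ((j : Nat) : Int) + 1 := by push_cast; ring
    rw [hcast, PySem.List.pyRange_one_succ_right (by positivity), List.foldl_append, ih]
    simp only [List.foldl_cons, List.foldl_nil, List.range_succ, List.map_append,
      List.map_cons, List.map_nil, Prod.mk.injEq]
    by_cases hjr : j < r
    · have hlt : ((j : Nat) : Int) < (r : Int) := by exact_mod_cast hjr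
      have hjq : (j + 1) * q = j * q + q := by ring
      have hN : (j + 1) * q + min (j + 1) r = j * q + min j r + (q + 1) := by
        rw [Nat.min_eq_left hjr, Nat.min_eq_left (by omega)]; omega
      rw [if_pos hlt]
      constructor
      · have hb : ((j * q + min j r : Nat) : Int) + (q : Int) + 1
            = (((j * q + min j r) + (q + 1) : Nat) : Int) := by push_cast; ring
        rw [hb, PySem.List.slice_natCast]
        simp [chunkN, if_pos hjr]
      · rw [hN]; push_cast; ring
    · have hlt : ¬ (((j : Nat) : Int) < (r : Int)) := by exact_mod_cast hjr
      have hjq : (j + 1) * q = j * q + q := by ring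
      have hN : (j + 1) * q + min (j + 1) r = j * q + min j r + q := by
        rw [Nat.min_eq_right (by omega), Nat.min_eq_right (by omega)]; omega
      rw [if_neg hlt]
      constructor
      · have hb : ((j * q + min j r : Nat) : Int) + (q : Int) + 0
            = (((j * q + min j r) + q : Nat) : Int) := by push_cast; ring
        rw [hb, PySem.List.slice_natCast]
        simp [chunkN, if_neg hjr]
      · rw [hN]; push_cast; ring

-- B's loop invariant: m countdown steps starting from suffix ys append exactly the m
-- balanced chunks of ys (with divmod recomputed each step).
lemma B_inv (m : Nat) : ∀ (ys : List Int) (acc : List (List Int)),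
    ((PySem.List.pyRange (m : Int) 0 (-1)).foldl
      (fun (st : List (List Int) × List Int × Int) still =>
        let q := PySem.Int.floordiv st.2.2 still
        let r := PySem.Int.mod st.2.2 still
        let size := q + (if r ≠ 0 then (1 : Int) else 0)
        (st.1 ++ [st.2.1.take size.toNat], st.2.1.drop size.toNat, st.2.2 - size))
      (acc, ys, (ys.length : Int))).1
    = acc ++ (List.range m).map (chunkN ys (ys.length / m) (ys.length % m)) := by
  induction m with
  | zero =>
    intro ys acc
    rw [PySem.List.pyRange_neg_one_eq_nil (by omega)]
    simp
  | succ m ih =>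
    intro ys acc
    have hcons : PySem.List.pyRange ((m + 1 : Nat) : Int) 0 (-1)
        = ((m + 1 : Nat) : Int) :: PySem.List.pyRange ((m : Nat) : Int) 0 (-1) := by
      rw [PySem.List.pyRange_neg_one_cons (by push_cast; omega)]
      congr 2
      push_cast; ring
    rw [hcons, List.foldl_cons]
    simp only [PySem.Int.floordiv_natCast, PySem.Int.mod_natCast]
    set n := ys.length with hn
    set q := n / (m + 1) with hq
    set r := n % (m + 1) with hr
    set s : Nat := q + if r ≠ 0 then 1 else 0 with hs
    have hdm : q * (m + 1) + r = n := by
      rw [hq, hr, Nat.mul_comm]; exact Nat.div_add_mod n (m + 1)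
    have hrlt : r < m + 1 := Nat.mod_lt _ (by omega)
    have hqmul : q * (m + 1) = q * m + q := by ring
    have hsle : s ≤ n := by rw [hs]; split_ifs <;> omega
    have hsize : (q : Int) + (if ((r : Nat) : Int) ≠ 0 then (1 : Int) else 0) = (s : Int) := by
      by_cases h : r = 0 <;> simp [hs, h]
    have hleft : ((n : Nat) : Int) - (s : Int) = ((n - s : Nat) : Int) := by omega
    have hlen' : (ys.drop s).length = n - s := by rw [List.length_drop, ← hn]
    rw [hsize, Int.toNat_natCast, hleft, ← hlen', ih]
    have hhead : chunkN ys q r 0 = ys.take s := by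
      simp only [chunkN, Nat.zero_mul, Nat.zero_min, Nat.zero_add,
        List.drop_zero, hs]
      by_cases h : r = 0 <;> simp [h, Nat.pos_of_ne_zero]
    have htail : (List.range m).map (chunkN (ys.drop s) ((ys.drop s).length / m) ((ys.drop s).length % m))
        = (List.range m).map (fun k => chunkN ys q r (k + 1)) := by
      rcases Nat.eq_zero_or_pos m with hm | hm
      · subst hm; simp
      · have hn' : (ys.drop s).length = q * m + (r - if r ≠ 0 then 1 else 0) := by
          rw [List.length_drop, ← hn, hs]; split_ifs <;> omega
        set r2 : Nat := r - if r ≠ 0 then 1 else 0 with hr2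
        have hr2lt : r2 < m := by rw [hr2]; split_ifs <;> omega
        have hdiv : (ys.drop s).length / m = q := by
          rw [hn', Nat.mul_comm q m, Nat.mul_add_div hm, Nat.div_eq_of_lt hr2lt, Nat.add_zero]
        have hmod : (ys.drop s).length % m = r2 := by
          rw [hn', Nat.mul_comm q m, Nat.mul_add_mod, Nat.mod_eq_of_lt hr2lt]
        rw [hdiv, hmod]
        apply List.map_congr_left
        intro k _
        have hkq : (k + 1) * q = k * q + q := by ring
        simp only [chunkN, List.drop_drop]
        have harg : s + (k * q + min k r2) = (k + 1) * q + min (k + 1) r := by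
          rw [hs, hr2]; split_ifs <;> omega
        have hlen : (q + if k < r2 then 1 else 0) = (q + if k + 1 < r then 1 else 0) := by
          rw [hr2]; split_ifs <;> omega
        rw [harg, hlen]
    rw [htail, List.range_succ_eq_map, List.map_cons, List.map_map, hhead]
    simp [Function.comp, Nat.succ_eq_add_one]

theorem allocate_ids_eq (xs : List Int) (tp : Int) (htp : tp ≠ 0) :
    allocate_ids xs tp = allocate_ids_alt xs tp := by
  rcases lt_or_gt_of_ne htp with h | h
  · -- tp < 0: both loops run over an empty range
    unfold allocate_ids allocate_ids_alt
    rw [PySem.List.pyRange_one_eq_nil (by omega), PySem.List.pyRange_neg_one_eq_nil (by omega)]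
    rfl
  · -- tp > 0: reduce both sides to the closed-form chunk list
    obtain ⟨k, rfl⟩ : ∃ k : Nat, tp = (k : Int) := ⟨tp.toNat, by omega⟩
    unfold allocate_ids allocate_ids_alt
    simp only [PySem.Int.floordiv_natCast, PySem.Int.mod_natCast]
    rw [A_inv xs (xs.length / k) (xs.length % k) k, B_inv k xs []]
    simp

-- ===== VERDICT (by name: the statement is the Claim_ definition above) =====
theorem allocate_ids_spec : Claim_equal_allocate_ids := by
  intro xs tp _ htp
  unfold Spec_allocate_ids
  exact allocate_ids_eq xs tp htp
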